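-- pv_equiv track=rewrite | github.com/workelaina/DecVFAL | exp/utils.py | split_l
-- ===== SOURCE A (Python) =====
-- from typing import Iterable, Tuple, Literal
--
-- def split_l(shape_1: int, n_client: int) -> Iterable[int]:
--     a = shape_1 // n_client
--     l1 = shape_1 - a*n_client
--     # l0 = n_client - l1
--     # l = [a+1]*l1 + [a]*l0
--
--     b = 0
--     ans = [0]
--     for _ in range(l1):
--         b += a+1
--         ans.append(b)
--     for _ in range(l1, n_client):
--         b += a
--         ans.append(b)
--     return ans
-- ===== SOURCE B (Python) =====
-- def split_l(shape_1: int, n_client: int):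
--     a = shape_1 // n_client
--     l1 = shape_1 % n_client
--     return [0] + [i * a + min(i, l1) for i in range(1, n_client + 1)]
-- ===== Notes on version B (the rewrite author's own statement) =====
-- stated objective: simpler
-- what changed: Replaces the two accumulator loops that build the boundaries by running prefix sums with a single closed-form expression i*a + min(i, l1) computed independently for each boundary index.
import Mathlib
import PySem

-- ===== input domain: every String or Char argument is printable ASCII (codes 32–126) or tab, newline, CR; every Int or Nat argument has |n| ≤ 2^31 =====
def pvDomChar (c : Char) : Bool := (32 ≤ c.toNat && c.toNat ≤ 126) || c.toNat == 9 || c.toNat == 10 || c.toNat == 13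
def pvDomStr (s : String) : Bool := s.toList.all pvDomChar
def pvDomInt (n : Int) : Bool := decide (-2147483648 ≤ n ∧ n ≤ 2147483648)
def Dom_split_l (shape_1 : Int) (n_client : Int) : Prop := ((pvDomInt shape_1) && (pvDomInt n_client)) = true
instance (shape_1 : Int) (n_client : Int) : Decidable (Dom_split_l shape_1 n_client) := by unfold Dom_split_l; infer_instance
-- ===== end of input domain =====

-- B replaces A's two running-accumulator append loops with one closed-form expression per boundary (objective: simpler).

-- ===== PORT A =====
def split_l (shape_1 : Int) (n_client : Int) : List Int :=
  let a := PySem.Int.floordiv shape_1 n_client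
  let l1 := shape_1 - a * n_client
  let st1 := (PySem.List.pyRange 0 l1 1).foldl
      (fun (p : Int × List Int) _ => (p.1 + (a + 1), p.2 ++ [p.1 + (a + 1)])) (0, [0])
  let st2 := (PySem.List.pyRange l1 n_client 1).foldl
      (fun (p : Int × List Int) _ => (p.1 + a, p.2 ++ [p.1 + a])) st1
  st2.2

-- ===== PORT B =====
def split_l_alt (shape_1 : Int) (n_client : Int) : List Int :=
  let a := PySem.Int.floordiv shape_1 n_client
  let l1 := PySem.Int.mod shape_1 n_client
  [0] ++ (PySem.List.pyRange 1 (n_client + 1) 1).map (fun i => i * a + min i l1)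

-- ===== PRECONDITION & SPEC =====
-- Pre_ excludes exactly n_client = 0, where Python's '//' and '%' raise ZeroDivisionError in both A and B.
def Pre_split_l (shape_1 : Int) (n_client : Int) : Prop := n_client ≠ 0
instance (shape_1 : Int) (n_client : Int) : Decidable (Pre_split_l shape_1 n_client) := by unfold Pre_split_l; infer_instance
def pvWitness_split_l : Int × Int := (10, 3)

def Spec_split_l (shape_1 : Int) (n_client : Int) (out : List Int) : Prop := out = split_l_alt shape_1 n_client
instance (shape_1 : Int) (n_client : Int) (out : List Int) : Decidable (Spec_split_l shape_1 n_client out) := by unfold Spec_split_l; infer_instance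

-- ===== CLAIM (what is proved, stated in full; the proofs are below) =====
def Claim_equal_split_l : Prop := ∀ (shape_1 : Int) (n_client : Int), Dom_split_l shape_1 n_client → Pre_split_l shape_1 n_client → Spec_split_l shape_1 n_client (split_l shape_1 n_client)

-- ===== LEMMAS AND PROOFS =====

theorem pv_fold_const_step (c : Int) (xs : List Int) (b : Int) (acc : List Int) :
    xs.foldl (fun (p : Int × List Int) _ => (p.1 + c, p.2 ++ [p.1 + c])) (b, acc)
      = (b + (xs.length : Int) * c,
         acc ++ (List.range xs.length).map (fun (k : Nat) => b + ((k : Int) + 1) * c)) := by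
  induction xs generalizing b acc with
  | nil => simp
  | cons x xs ih =>
    simp only [List.foldl_cons, ih, List.length_cons, Prod.mk.injEq]
    refine ⟨by push_cast; ring, ?_⟩
    rw [List.range_succ_eq_map, List.map_cons, List.map_map, List.append_assoc,
        List.singleton_append]
    congr 1
    congr 1
    · push_cast; ring
    · apply List.map_congr_left
      intro k _
      simp only [Function.comp]
      push_cast; ring

theorem split_l_spec_aux (shape_1 n_client : Int) (hn : n_client ≠ 0) :
    split_l shape_1 n_client = split_l_alt shape_1 n_client := by
  simp only [split_l, split_l_alt]
  set a := PySem.Int.floordiv shape_1 n_client with ha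
  have hmod : shape_1 - a * n_client = PySem.Int.mod shape_1 n_client := by
    have h := PySem.Int.floordiv_mul_add_mod shape_1 n_client
    rw [ha]; linarith
  set l1 := PySem.Int.mod shape_1 n_client with hl1
  rw [hmod]
  rcases lt_or_gt_of_ne hn with hneg | hpos
  · -- n_client < 0: every range is empty on both sides
    obtain ⟨hlo, hhi⟩ := PySem.Int.mod_neg_bounds shape_1 hneg
    rw [PySem.List.pyRange_one_eq_nil (by omega : l1 ≤ (0:Int)),
        PySem.List.pyRange_one_eq_nil (by omega : n_client ≤ l1),
        PySem.List.pyRange_one_eq_nil (by omega : n_client + 1 ≤ (1:Int))]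
    simp
  · -- n_client > 0: 0 ≤ l1 < n_client
    have h0 : 0 ≤ l1 := PySem.Int.mod_nonneg shape_1 hpos
    have h1 : l1 < n_client := PySem.Int.mod_lt shape_1 hpos
    rw [pv_fold_const_step, pv_fold_const_step]
    simp only [PySem.List.pyRange_one, List.map_map, List.length_map, List.length_range]
    have e0 : ((l1 - 0).toNat : Int) = l1 := by omega
    have e2 : (n_client + 1 - 1).toNat = (l1 - 0).toNat + (n_client - l1).toNat := by omega
    rw [e2, List.range_add, List.map_append, List.append_assoc]
    congr 1
    congr 1
    · -- first segment: indices k < l1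
      apply List.map_congr_left
      intro k hk
      rw [List.mem_range] at hk
      simp only [Function.comp]
      have hk' : (k : Int) + 1 ≤ l1 := by omega
      have hmin : min (1 + (k : Int)) l1 = 1 + k := by omega
      rw [hmin]; ring
    · -- second segment: indices l1 + k
      rw [List.map_map]
      apply List.map_congr_left
      intro k hk
      rw [List.mem_range] at hk
      simp only [Function.comp]
      have hcast : ((((l1 - 0).toNat + k : Nat)) : Int) = l1 + k := by push_cast; omega
      rw [hcast, e0]
      have hmin : min (1 + (l1 + (k : Int))) l1 = l1 := by omega
      rw [hmin]
      ring

-- ===== VERDICT (by name: the statement is the Claim_ definition above) =====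
theorem split_l_spec : Claim_equal_split_l := by
  intro s n _ hpre
  exact split_l_spec_aux s n hpre
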